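-- pv_equiv track=rewrite | github.com/UW-OCP/Collocation-Method-with-Adaptive-Mesh | OCP2ABVP.py | _make_variables_py0
-- ===== SOURCE A (Python) =====
-- def _make_variables_py0(line, typ):
--     rline = ''
--     k = 0
--     np = line.count(',') + 1
--     rline += '_o.%s = [0] * %d\n' % (typ,np)
--     i = line.find('[')
--     while (line[i] != ']'):
--         p = ''
--         while ((line[i + 1] != ',')
--                 and (line[i + 1] != ']')):
--             p += line[i + 1]
--             i += 1
--         rline += '%s = Symbol(\'%s\')\n' % (p, p)
--         rline += '_o.%s[%d] = %s\n' % (typ, k, p)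
--         i += 1
--         k += 1
--
--     return (rline, k)
-- ===== SOURCE B (Python) =====
-- def _make_variables_py0(line, typ):
--     np = line.count(',') + 1
--     rline = '_o.%s = [0] * %d\n' % (typ, np)
--     start = line.find('[')
--     end = line.index(']', start + 1)
--     tokens = line[start + 1:end].split(',')
--     for k, p in enumerate(tokens):
--         rline += '%s = Symbol(\'%s\')\n' % (p, p)
--         rline += '_o.%s[%d] = %s\n' % (typ, k, p)
--     return (rline, len(tokens))
-- ===== Notes on version B (the rewrite author's own statement) =====
-- stated objective: simpler
-- what changed: Replaces A's nested char-by-char index-scanning while loops with an extract-then-tokenize pass: find '[' and the next ']', slice the text between them, split it on ',' and emit the two code lines per token in one enumerate loop.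
-- intended difference: On lines containing no '[' whose last character is ']', A's find returns -1 and the negative index line[-1] accidentally reads that final ']', so A emits no symbol definitions and returns k = 0, while B tokenizes the names before the first ']' as intended. — e.g. on _make_variables_py0("x]", "t"): A returns ("_o.t = [0] * 1\n", 0), B returns ("_o.t = [0] * 1\nx = Symbol('x')\n_o.t[0] = x\n", 1)
import Mathlib
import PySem

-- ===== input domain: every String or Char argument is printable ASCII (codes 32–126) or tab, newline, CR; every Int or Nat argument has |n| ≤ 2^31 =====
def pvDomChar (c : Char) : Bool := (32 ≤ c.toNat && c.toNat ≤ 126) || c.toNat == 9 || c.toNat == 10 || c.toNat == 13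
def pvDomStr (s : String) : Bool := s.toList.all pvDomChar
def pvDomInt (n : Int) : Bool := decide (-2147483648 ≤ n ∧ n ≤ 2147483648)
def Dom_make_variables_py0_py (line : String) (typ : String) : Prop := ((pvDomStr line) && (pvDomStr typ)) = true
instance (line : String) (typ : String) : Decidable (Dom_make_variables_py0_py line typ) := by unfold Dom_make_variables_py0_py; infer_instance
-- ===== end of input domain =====

-- B replaces A's nested char-by-char index scanner by find/slice/split plus one enumerate loop (objective: simpler); on lines with no '[' whose last char is ']' the two differ (see D_ below).

-- ===== PORT A =====
-- inner while loop: p accumulates the chars of one name (p kept as List Char, String.ofList where A uses the string);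
-- PySem.List.pyGet? cs (i+1) = line[i+1] with Python semantics (negative index from the end, none = IndexError)
def mvAInner (cs : List Char) (i : Int) (p : List Char) : Nat → Option (List Char × Int)
  | 0 => none
  | fuel+1 =>
    match PySem.List.pyGet? cs (i+1) with
    | none => none                         -- Python: IndexError
    | some c =>
      if c = ',' ∨ c = ']' then some (p, i)
      else mvAInner cs (i+1) (p ++ [c]) (fuel)

-- outer while loop over (i, k, rline)
def mvAOuter (cs : List Char) (typ : String) (i k : Int) (rline : String) : Nat → Option (String × Int)
  | 0 => none
  | fuel+1 =>
    match PySem.List.pyGet? cs i with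
    | none => none                         -- Python: IndexError
    | some c =>
      if c = ']' then some (rline, k)
      else
        match mvAInner cs i [] (cs.length + 1) with
        | none => none
        | some (p, i') =>
          let rline := rline ++ (String.ofList p ++ " = Symbol('" ++ String.ofList p ++ "')\n")
          let rline := rline ++ ("_o." ++ typ ++ "[" ++ PySem.Int.toStr k ++ "] = " ++ String.ofList p ++ "\n")
          mvAOuter cs typ (i' + 1) (k + 1) rline fuel

def make_variables_py0_py (line : String) (typ : String) : String × Int :=
  let rline : String := ""
  let np : Int := (PySem.Str.count line "," : Int) + 1
  let rline := rline ++ ("_o." ++ typ ++ " = [0] * " ++ PySem.Int.toStr np ++ "\n")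
  let i : Int := PySem.Str.find line "["
  -- fuel length+2 suffices: i strictly increases and stays ≥ -1
  match mvAOuter line.toList typ i 0 rline (line.toList.length + 2) with
  | some r => r
  | none => ("", 0)                        -- unreachable under Pre_ (Python raises IndexError there)

-- ===== PORT B =====
def make_variables_py0_py_alt (line : String) (typ : String) : String × Int :=
  let np : Int := (PySem.Str.count line "," : Int) + 1
  let rline : String := "_o." ++ typ ++ " = [0] * " ++ PySem.Int.toStr np ++ "\n"
  let start : Int := PySem.Str.find line "["
  -- line.index(']', start + 1): -1 means Python raises ValueError (outside Pre_)
  let endi : Int := PySem.Str.findFrom line "]" (start + 1)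
  if endi = -1 then ("", 0)
  else
    -- line[start+1:endi].split(',') — tokens kept as List Char
    let tokens : List (List Char) := PySem.Chars.splitOn (PySem.List.slice line.toList (some (start+1)) (some endi)) [',']
    let rline := (PySem.List.enumerate tokens).foldl (fun r kp =>
        r ++ (String.ofList kp.2 ++ " = Symbol('" ++ String.ofList kp.2 ++ "')\n")
          ++ ("_o." ++ typ ++ "[" ++ PySem.Int.toStr kp.1 ++ "] = " ++ String.ofList kp.2 ++ "\n")) rline
    (rline, (tokens.length : Int))

-- ===== PRECONDITION & SPEC =====
-- Pre_ excludes exactly the inputs on which A raises IndexError (no ']' at or after the position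
-- where A starts scanning, i.e. after the first '[', or from index 0 when there is no '[').
def Pre_make_variables_py0_py (line : String) (typ : String) : Prop :=
  ']' ∈ line.toList.drop ((PySem.Str.find line "[" + 1).toNat)
instance (line : String) (typ : String) : Decidable (Pre_make_variables_py0_py line typ) := by
  unfold Pre_make_variables_py0_py; infer_instance

def pvWitness_make_variables_py0_py : String × String := ("x = [a, b]", "x")

-- On lines with no '[' whose last character is ']', A's find returns -1 and the negative index
-- line[-1] accidentally reads that ']', so A emits no symbol definitions and returns k = 0, while B
-- tokenizes the names before the first ']' as intended.
def D_make_variables_py0_py (line : String) (typ : String) : Prop :=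
  PySem.Str.isIn "[" line = false ∧ PySem.Str.endswith line "]" = true
instance (line : String) (typ : String) : Decidable (D_make_variables_py0_py line typ) := by
  unfold D_make_variables_py0_py; infer_instance

def Spec_make_variables_py0_py (line : String) (typ : String) (out : String × Int) : Prop :=
  ¬ D_make_variables_py0_py line typ → out = make_variables_py0_py_alt line typ
instance (line : String) (typ : String) (out : String × Int) : Decidable (Spec_make_variables_py0_py line typ out) := by
  unfold Spec_make_variables_py0_py; infer_instance

def pvDiffWitness_make_variables_py0_py : String × String := ("x]", "t")
def pvDiffWitnessOut_make_variables_py0_py : (String × Int) × (String × Int) :=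
  (("_o.t = [0] * 1\n", 0), ("_o.t = [0] * 1\nx = Symbol('x')\n_o.t[0] = x\n", 1))

-- ===== CLAIM (what is proved, stated in full; the proofs are below) =====
def Claim_unchanged_make_variables_py0_py : Prop := ∀ (line : String) (typ : String), Dom_make_variables_py0_py line typ → Pre_make_variables_py0_py line typ → Spec_make_variables_py0_py line typ (make_variables_py0_py line typ)
def Claim_changed_make_variables_py0_py : Prop := Dom_make_variables_py0_py (pvDiffWitness_make_variables_py0_py.1) (pvDiffWitness_make_variables_py0_py.2) ∧ Pre_make_variables_py0_py (pvDiffWitness_make_variables_py0_py.1) (pvDiffWitness_make_variables_py0_py.2) ∧ D_make_variables_py0_py (pvDiffWitness_make_variables_py0_py.1) (pvDiffWitness_make_variables_py0_py.2) ∧ make_variables_py0_py (pvDiffWitness_make_variables_py0_py.1) (pvDiffWitness_make_variables_py0_py.2) = pvDiffWitnessOut_make_variables_py0_py.1 ∧ make_variables_py0_py_alt (pvDiffWitness_make_variables_py0_py.1) (pvDiffWitness_make_variables_py0_py.2) = pvDiffWitnessOut_make_variables_py0_py.2 ∧ pvDiffWitnessOut_make_variables_py0_py.1 ≠ pvDi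ffWitnessOut_make_variables_py0_py.2
def Claim_exact_make_variables_py0_py : Prop := ∀ (line : String) (typ : String), Dom_make_variables_py0_py line typ → Pre_make_variables_py0_py line typ → D_make_variables_py0_py line typ → make_variables_py0_py line typ ≠ make_variables_py0_py_alt line typ

-- ===== LEMMAS AND PROOFS =====

def pvTokens : List Char → List (List Char)
  | [] => [[]]
  | c :: t => if c = ',' then [] :: pvTokens t else (pvTokens t).modifyHead (c :: ·)

theorem pvTokens_ne_nil (l : List Char) : pvTokens l ≠ [] := by
  cases l with
  | nil => simp [pvTokens]
  | cons c t =>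
    simp only [pvTokens]
    split
    · simp
    · intro h
      have := List.modifyHead_eq_nil_iff.mp h
      exact pvTokens_ne_nil t this

theorem splitOn_go_spec (fuel : Nat) (l cur : List Char) (acc : List (List Char))
    (h : l.length ≤ fuel) :
    PySem.Chars.splitOn.go [','] fuel l cur acc
      = acc.reverse ++ (pvTokens l).modifyHead (cur.reverse ++ ·) := by
  induction fuel generalizing l cur acc with
  | zero =>
    have : l = [] := by simpa using h
    subst this
    simp [PySem.Chars.splitOn.go, pvTokens]
  | succ fuel ih =>
    cases l with
    | nil => simp [PySem.Chars.splitOn.go, pvTokens]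
    | cons c t =>
      by_cases hc : c = ','
      · subst hc
        rw [show PySem.Chars.splitOn.go [','] (fuel+1) (','::t) cur acc
              = PySem.Chars.splitOn.go [','] fuel (List.drop 1 (','::t)) [] (cur.reverse :: acc) by
            simp [PySem.Chars.splitOn.go, List.isPrefixOf]]
        rw [ih _ _ _ (by simpa using h)]
        have hid : List.modifyHead (fun x : List Char => List.reverse [] ++ x) (pvTokens (List.drop 1 (','::t))) = pvTokens t := by
          rw [show (fun x : List Char => List.reverse [] ++ x) = id from rfl, List.modifyHead_id]; rfl
        rw [hid]
        simp [pvTokens]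
      · rw [show PySem.Chars.splitOn.go [','] (fuel+1) (c::t) cur acc
              = PySem.Chars.splitOn.go [','] fuel t (c :: cur) acc by
            simp [PySem.Chars.splitOn.go, List.isPrefixOf, (show ¬(',' = c) from fun h => hc (Eq.symm h))]]
        rw [ih _ _ _ (by simpa using Nat.le_of_succ_le_succ h)]
        simp [pvTokens, hc, List.modifyHead_modifyHead]
        rfl

theorem splitOn_eq_pvTokens (l : List Char) : PySem.Chars.splitOn l [','] = pvTokens l := by
  unfold PySem.Chars.splitOn
  rw [splitOn_go_spec _ _ _ _ (by omega),
    show (fun x : List Char => List.reverse [] ++ x) = id from rfl, List.modifyHead_id]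
  simp

theorem pvTokens_no_comma (l : List Char) (h : ',' ∉ l) : pvTokens l = [l] := by
  induction l with
  | nil => rfl
  | cons c t ih =>
    simp only [List.mem_cons, not_or] at h
    simp [pvTokens, (show ¬ c = ',' from fun hh => h.1 (Eq.symm hh)), ih h.2, List.modifyHead]

theorem pvTokens_append_comma (t r : List Char) (h : ',' ∉ t) :
    pvTokens (t ++ ',' :: r) = t :: pvTokens r := by
  induction t with
  | nil => simp [pvTokens]
  | cons c s ih =>
    simp only [List.mem_cons, not_or] at h
    have hc : ¬ c = ',' := fun hh => h.1 hh.symm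
    simp [pvTokens, hc, ih h.2, List.modifyHead]

theorem find_go_single (c : Char) (l : List Char) (k : Nat) :
    PySem.Chars.find.go [c] l k
      = if c ∈ l then ((k : Int) + ((l.takeWhile (· ≠ c)).length : Int)) else -1 := by
  induction l generalizing k with
  | nil => simp [PySem.Chars.find.go]
  | cons d t ih =>
    by_cases hd : d = c
    · subst hd
      simp [PySem.Chars.find.go, List.isPrefixOf, List.takeWhile]
    · rw [show PySem.Chars.find.go [c] (d :: t) k = PySem.Chars.find.go [c] t (k+1) by
        simp [PySem.Chars.find.go, List.isPrefixOf, (show ¬ c = d from fun hh => hd (Eq.symm hh))]]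
      rw [ih]
      simp [hd, List.takeWhile, (show ¬ c = d from fun hh => hd (Eq.symm hh))]
      split
      · omega
      · rfl

theorem find_single (l : List Char) (c : Char) :
    PySem.Chars.find l [c] = if c ∈ l then ((l.takeWhile (· ≠ c)).length : Int) else -1 := by
  unfold PySem.Chars.find
  rw [find_go_single]
  simp

def pvLines (typ : String) : Int → List (List Char) → String
  | _, [] => ""
  | k, p :: ps =>
      (String.ofList p ++ " = Symbol('" ++ String.ofList p ++ "')\n")
      ++ ("_o." ++ typ ++ "[" ++ PySem.Int.toStr k ++ "] = " ++ String.ofList p ++ "\n")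
      ++ pvLines typ (k+1) ps

theorem enum_foldl (typ : String) (toks : List (List Char)) (k : Int) (r : String) :
    (PySem.List.enumerate toks k).foldl (fun r kp =>
      r ++ (String.ofList kp.2 ++ " = Symbol('" ++ String.ofList kp.2 ++ "')\n")
        ++ ("_o." ++ typ ++ "[" ++ PySem.Int.toStr kp.1 ++ "] = " ++ String.ofList kp.2 ++ "\n")) r
    = r ++ pvLines typ k toks := by
  induction toks generalizing k r with
  | nil => simp [PySem.List.enumerate, pvLines]
  | cons p ps ih =>
    rw [PySem.List.enumerate_cons, List.foldl_cons, ih]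
    simp [pvLines, String.append_assoc]

theorem innerEq (cs : List Char) (j : Nat) (p : List Char) (fuel : Nat)
    (hf : cs.length + 1 - j ≤ fuel)
    (hstop : (cs.drop j).dropWhile (fun c => !(c == ',' || c == ']')) ≠ []) :
    mvAInner cs ((j : Int) - 1) p fuel
      = some (p ++ (cs.drop j).takeWhile (fun c => !(c == ',' || c == ']')),
              (j : Int) + (((cs.drop j).takeWhile (fun c => !(c == ',' || c == ']'))).length : Int) - 1) := by
  induction fuel generalizing j p with
  | zero =>
    exfalso
    have hj : cs.length ≤ j := by omega
    rw [List.drop_eq_nil_of_le hj] at hstop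
    simp at hstop
  | succ fuel ih =>
    have hjlt : j < cs.length := by
      by_contra hh
      rw [List.drop_eq_nil_of_le (by omega)] at hstop
      simp at hstop
    obtain ⟨c, rest', hdrop⟩ : ∃ c rest', cs.drop j = c :: rest' := by
      cases h : cs.drop j with
      | nil => exact absurd (List.drop_eq_nil_iff.mp h) (by omega)
      | cons a b => exact ⟨a, b, rfl⟩
    have hget : PySem.List.pyGet? cs (((j : Int) - 1) + 1) = some c := by
      have : ((j : Int) - 1) + 1 = (j : Int) := by ring
      rw [this, PySem.List.pyGet?_natCast]
      have h0 : (List.drop j cs)[0]? = cs[j + 0]? := List.getElem?_drop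
      rw [hdrop] at h0
      simpa using h0.symm
    rw [show mvAInner cs ((j:Int)-1) p (fuel+1)
        = match PySem.List.pyGet? cs (((j:Int)-1)+1) with
          | none => none
          | some c => if c = ',' ∨ c = ']' then some (p, (j:Int)-1)
                      else mvAInner cs (((j:Int)-1)+1) (p ++ [c]) fuel from rfl, hget]
    show (if c = ',' ∨ c = ']' then some (p, (j:Int)-1)
          else mvAInner cs (((j:Int)-1)+1) (p ++ [c]) fuel) = _
    by_cases hsep : c = ',' ∨ c = ']'
    · rw [if_pos hsep]
      have : (cs.drop j).takeWhile (fun c => !(c == ',' || c == ']')) = [] := by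
        rw [hdrop, List.takeWhile_cons]
        rcases hsep with h | h <;> simp [h]
      rw [this]
      simp
    · rw [if_neg hsep]
      rw [not_or] at hsep
      have hcb : (!(c == ',' || c == ']')) = true := by simp [hsep.1, hsep.2]
      have hdrop1 : cs.drop (j+1) = rest' := by
        have h1 : List.drop 1 (List.drop j cs) = List.drop (j + 1) cs := List.drop_drop
        rw [hdrop] at h1
        simpa using h1.symm
      have htk : (cs.drop j).takeWhile (fun c => !(c == ',' || c == ']'))
          = c :: (cs.drop (j+1)).takeWhile (fun c => !(c == ',' || c == ']')) := by
        rw [hdrop, List.takeWhile_cons, if_pos hcb, hdrop1]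
      have hdw : (cs.drop (j+1)).dropWhile (fun c => !(c == ',' || c == ']')) ≠ [] := by
        rw [hdrop1]
        rw [hdrop, List.dropWhile_cons, if_pos hcb] at hstop
        exact hstop
      have hrec := ih (j+1) (p ++ [c]) (by omega) hdw
      have hcast : ((j : Int) - 1) + 1 = ((j + 1 : Nat) : Int) - 1 := by push_cast; ring
      rw [hcast, hrec, htk]
      simp only [Option.some.injEq, Prod.mk.injEq]
      refine ⟨by simp, by simp only [List.length_cons]; push_cast; ring⟩

theorem takeWhile_append_all {p : Char → Bool} (t r : List Char) (h : ∀ x ∈ t, p x = true) :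
    List.takeWhile p (t ++ r) = t ++ List.takeWhile p r := by
  induction t with
  | nil => simp
  | cons a s ih =>
    rw [List.cons_append, List.takeWhile_cons, if_pos (h a (by simp)), ih (fun x hx => h x (by simp [hx]))]
    rfl

theorem dropWhile_head_false {p : Char → Bool} : ∀ (l : List Char) (sep : Char) (rest : List Char), l.dropWhile p = sep :: rest → p sep = false := by
  intro l
  induction l with
  | nil => simp
  | cons a t ih =>
    intro sep rest h
    rw [List.dropWhile_cons] at h
    by_cases hp : p a
    · rw [if_pos hp] at h
      exact ih _ _ h
    · rw [if_neg hp] at h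
      cases h
      simpa using hp

theorem outerEq (cs : List Char) (typ : String) (fuel : Nat) (j : Nat) (k : Int) (rline : String)
    (hj : ']' ∈ cs.drop j)
    (hf : cs.length + 2 - j ≤ fuel)
    (hd : ∃ d, PySem.List.pyGet? cs ((j : Int) - 1) = some d ∧ d ≠ ']') :
    mvAOuter cs typ ((j : Int) - 1) k rline fuel
      = some (rline ++ pvLines typ k (pvTokens ((cs.drop j).takeWhile (· ≠ ']'))),
              k + (pvTokens ((cs.drop j).takeWhile (· ≠ ']'))).length) := by
  induction fuel generalizing j k rline with
  | zero =>
    exfalso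
    have : j < cs.length := by
      by_contra hh
      rw [List.drop_eq_nil_of_le (by omega)] at hj
      simp at hj
    omega
  | succ fuel ih =>
    have hjlt : j < cs.length := by
      by_contra hh
      rw [List.drop_eq_nil_of_le (by omega)] at hj
      simp at hj
    obtain ⟨d, hdget, hdne⟩ := hd
    -- unfold one outer step
    rw [show mvAOuter cs typ ((j:Int)-1) k rline (fuel+1)
        = match PySem.List.pyGet? cs ((j:Int)-1) with
          | none => none
          | some c =>
            if c = ']' then some (rline, k)
            else
              match mvAInner cs ((j:Int)-1) [] (cs.length + 1) with
              | none => none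
              | some (p, i') =>
                let rline1 := rline ++ (String.ofList p ++ " = Symbol('" ++ String.ofList p ++ "')\n")
                let rline2 := rline1 ++ ("_o." ++ typ ++ "[" ++ PySem.Int.toStr k ++ "] = " ++ String.ofList p ++ "\n")
                mvAOuter cs typ (i' + 1) (k + 1) rline2 fuel from rfl, hdget]
    show (if d = ']' then some (rline, k)
          else
            match mvAInner cs ((j:Int)-1) [] (cs.length + 1) with
            | none => none
            | some (p, i') =>
              let rline1 := rline ++ (String.ofList p ++ " = Symbol('" ++ String.ofList p ++ "')\n")
              let rline2 := rline1 ++ ("_o." ++ typ ++ "[" ++ PySem.Int.toStr k ++ "] = " ++ String.ofList p ++ "\n")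
              mvAOuter cs typ (i' + 1) (k + 1) rline2 fuel) = _
    rw [if_neg hdne]
    set predB : Char → Bool := fun c => !(c == ',' || c == ']') with hpredB
    have hstop : (cs.drop j).dropWhile predB ≠ [] := by
      intro hh
      have := (List.dropWhile_eq_nil_iff).mp hh ']' hj
      simp [hpredB] at this
    rw [innerEq cs j [] (cs.length + 1) (by omega) hstop]
    set t := (cs.drop j).takeWhile predB with ht
    have hmem : ∀ x ∈ t, x ≠ ',' ∧ x ≠ ']' := by
      intro x hx
      have := List.mem_takeWhile_imp hx
      simp [hpredB] at this
      exact this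
    obtain ⟨sep, rest2, hdw⟩ : ∃ sep rest2, (cs.drop j).dropWhile predB = sep :: rest2 := by
      cases h : (cs.drop j).dropWhile predB with
      | nil => exact absurd h hstop
      | cons a b => exact ⟨a, b, rfl⟩
    have hsplit : cs.drop j = t ++ sep :: rest2 := by
      rw [ht, ← hdw, List.takeWhile_append_dropWhile]
    have hsep : sep = ',' ∨ sep = ']' := by
      have hpf := dropWhile_head_false _ _ _ hdw
      simp [hpredB] at hpf
      tauto
    have hdropjt : cs.drop (j + t.length) = sep :: rest2 := by
      have : cs.drop (j + t.length) = (cs.drop j).drop t.length := by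
        rw [List.drop_drop, Nat.add_comm]
      rw [this, hsplit, List.drop_left' rfl]
    have hgetsep : PySem.List.pyGet? cs ((j : Int) + t.length) = some sep := by
      have hc : ((j : Int) + (t.length : Int)) = ((j + t.length : Nat) : Int) := by push_cast; ring
      rw [hc, PySem.List.pyGet?_natCast]
      have h0 : (List.drop (j + t.length) cs)[0]? = cs[(j + t.length) + 0]? := List.getElem?_drop
      rw [hdropjt] at h0
      simpa using h0.symm
    -- reduce the inner-result match and lets
    show (let rline1 := rline ++ (String.ofList ([] ++ t) ++ " = Symbol('" ++ String.ofList ([] ++ t) ++ "')\n")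
          let rline2 := rline1 ++ ("_o." ++ typ ++ "[" ++ PySem.Int.toStr k ++ "] = " ++ String.ofList ([] ++ t) ++ "\n")
          mvAOuter cs typ (((j:Int) + t.length - 1) + 1) (k + 1) rline2 fuel) = _
    simp only [List.nil_append]
    have hidx : ((j:Int) + t.length - 1) + 1 = ((j + t.length + 1 : Nat) : Int) - 1 := by push_cast; ring
    rw [hidx]
    set A1 := (String.ofList t ++ " = Symbol('" ++ String.ofList t ++ "')\n") with hA1
    set A2 := ("_o." ++ typ ++ "[" ++ PySem.Int.toStr k ++ "] = " ++ String.ofList t ++ "\n") with hA2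
    rcases hsep with hsep | hsep
    · -- separator is ',' : loop again
      subst hsep
      have hdroprest : cs.drop (j + t.length + 1) = rest2 := by
        have h1 : List.drop 1 (List.drop (j + t.length) cs) = List.drop (j + t.length + 1) cs := List.drop_drop
        rw [hdropjt] at h1
        simpa using h1.symm
      have hj' : ']' ∈ cs.drop (j + t.length + 1) := by
        rw [hdroprest]
        have h2 := hj
        rw [hsplit] at h2
        rcases List.mem_append.mp h2 with h2 | h2
        · exact absurd rfl ((hmem _ h2).2)
        · rcases List.mem_cons.mp h2 with h2 | h2
          · exact absurd h2 (by decide)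
          · exact h2
      have hd' : ∃ d, PySem.List.pyGet? cs (((j + t.length + 1 : Nat) : Int) - 1) = some d ∧ d ≠ ']' := by
        refine ⟨',', ?_, by decide⟩
        have hc : ((j + t.length + 1 : Nat) : Int) - 1 = (j : Int) + t.length := by push_cast; ring
        rw [hc]
        exact hgetsep
      rw [ih (j + t.length + 1) (k + 1) _ hj' (by omega) hd']
      have htake : (cs.drop j).takeWhile (· ≠ ']')
          = t ++ ',' :: (cs.drop (j + t.length + 1)).takeWhile (· ≠ ']') := by
        rw [hsplit, takeWhile_append_all t _ (fun x hx => by simp [(hmem x hx).2]), hdroprest,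
          List.takeWhile_cons]
        simp
      rw [htake, pvTokens_append_comma _ _ (fun hc => ((hmem _ hc).1 rfl))]
      simp only [Option.some.injEq, Prod.mk.injEq, pvLines, List.length_cons]
      constructor
      · simp [hA1, hA2, String.append_assoc]
      · push_cast
        ring
    · -- separator is ']' : one more entry check and stop
      subst hsep
      have htake : (cs.drop j).takeWhile (· ≠ ']') = t := by
        rw [hsplit, takeWhile_append_all t _ (fun x hx => by simp [(hmem x hx).2]),
          List.takeWhile_cons]
        simp
      cases fuel with
      | zero => omega
      | succ fuel' =>
        have hget' : PySem.List.pyGet? cs (((j + t.length + 1 : Nat) : Int) - 1) = some ']' := by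
          have hc : ((j + t.length + 1 : Nat) : Int) - 1 = (j : Int) + t.length := by push_cast; ring
          rw [hc]
          exact hgetsep
        rw [show mvAOuter cs typ (((j + t.length + 1 : Nat) : Int) - 1) (k+1) ((rline ++ A1) ++ A2) (fuel'+1)
            = match PySem.List.pyGet? cs (((j + t.length + 1 : Nat) : Int) - 1) with
              | none => none
              | some c =>
                if c = ']' then some ((rline ++ A1) ++ A2, k+1)
                else
                  match mvAInner cs (((j + t.length + 1 : Nat) : Int) - 1) [] (cs.length + 1) with
                  | none => none
                  | some (p, i') =>
                    let rline1 := ((rline ++ A1) ++ A2) ++ (String.ofList p ++ " = Symbol('" ++ String.ofList p ++ "')\n")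
                    let rline2 := rline1 ++ ("_o." ++ typ ++ "[" ++ PySem.Int.toStr (k+1) ++ "] = " ++ String.ofList p ++ "\n")
                    mvAOuter cs typ (i' + 1) ((k+1) + 1) rline2 fuel' from rfl, hget']
        rw [htake, pvTokens_no_comma _ (fun hc => ((hmem _ hc).1 rfl))]
        simp only [pvLines, List.length_singleton]
        show some ((rline ++ A1) ++ A2, k + 1) = _
        simp [hA1, hA2, String.append_assoc]


theorem isIn_bracket (line : String) :
    PySem.Str.isIn "[" line = ('[' ∈ line.toList : Bool) := by
  show PySem.Chars.isIn ['['] line.toList = _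
  rw [PySem.Chars.isIn, find_single]
  by_cases hb : '[' ∈ line.toList <;> simp [hb]

-- the common reduction: both programs, from scan position j with a ']' ahead
theorem mainEq (line typ : String) (j : Nat)
    (hj : ']' ∈ line.toList.drop j) (hjle : j ≤ line.toList.length)
    (hfind : PySem.Str.find line "[" = (j : Int) - 1)
    (hd : ∃ d, PySem.List.pyGet? line.toList ((j : Int) - 1) = some d ∧ d ≠ ']') :
    make_variables_py0_py line typ = make_variables_py0_py_alt line typ := by
  simp only [make_variables_py0_py, make_variables_py0_py_alt, hfind]
  set cs := line.toList with hcs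
  set tw := (cs.drop j).takeWhile (· ≠ ']') with htw
  set H := "_o." ++ typ ++ " = [0] * " ++ PySem.Int.toStr ((PySem.Str.count line "," : Int) + 1) ++ "\n" with hH
  -- A side
  rw [outerEq cs typ (cs.length + 2) j 0 ("" ++ H) hj (by omega) hd]
  -- B side: endi = j + tw.length
  have hfindTw : PySem.Chars.find (cs.drop j) [']'] = (tw.length : Int) := by
    rw [find_single, if_pos hj]
  have hendi : PySem.Str.findFrom line "]" (((j : Int) - 1) + 1) = (j : Int) + (tw.length : Int) := by
    have h1 : ((j : Int) - 1) + 1 = (j : Int) := by ring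
    rw [h1]
    show PySem.Chars.findFrom cs [']'] (j : Int) none = _
    rw [PySem.Chars.findFrom_natCast cs [']'] j hjle, hfindTw]
    simp
  rw [hendi, if_neg (by omega)]
  have hslice : PySem.List.slice cs (some (((j : Int) - 1) + 1)) (some ((j : Int) + (tw.length : Int))) = tw := by
    have h1 : ((j : Int) - 1) + 1 = (j : Int) := by ring
    rw [h1, PySem.List.slice_natCast_add]
    exact (List.prefix_iff_eq_take.mp (List.takeWhile_prefix _)).symm
  rw [hslice, splitOn_eq_pvTokens, enum_foldl, htw]
  simp

-- ===== VERDICT (by name: the statement is the Claim_ definition above) =====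
theorem make_variables_py0_py_spec : Claim_unchanged_make_variables_py0_py := by
  intro line typ _ hpre
  unfold Spec_make_variables_py0_py
  intro hd
  set cs := line.toList with hcs
  have hfs : PySem.Str.find line "[" = PySem.Chars.find cs ['['] := rfl
  by_cases hb : '[' ∈ cs
  · -- a '[' exists: A starts scanning right after it, so does B
    set t0 := cs.takeWhile (· ≠ '[') with ht0
    have hfind : PySem.Chars.find cs ['['] = (t0.length : Int) := by
      rw [find_single, if_pos hb]
    have hstop0 : cs.dropWhile (· ≠ '[') ≠ [] := by
      intro hh
      have := (List.dropWhile_eq_nil_iff).mp hh '[' hb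
      simp at this
    obtain ⟨c0, r0, hdw0⟩ : ∃ c0 r0, cs.dropWhile (· ≠ '[') = c0 :: r0 := by
      cases h : cs.dropWhile (· ≠ '[') with
      | nil => exact absurd h hstop0
      | cons a b => exact ⟨a, b, rfl⟩
    have hc0 : c0 = '[' := by
      have := dropWhile_head_false _ _ _ hdw0
      simpa using this
    subst hc0
    have hsplit0 : cs = t0 ++ '[' :: r0 := by
      rw [ht0, ← hdw0, List.takeWhile_append_dropWhile]
    have hlt : t0.length < cs.length := by
      rw [hsplit0]
      simp
    have hpre' : ']' ∈ cs.drop (t0.length + 1) := by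
      have := hpre
      unfold Pre_make_variables_py0_py at this
      rw [hfs, hfind] at this
      simpa using this
    apply mainEq line typ (t0.length + 1) hpre' (by exact hlt)
    · rw [hfs, hfind]; push_cast; ring
    · refine ⟨'[', ?_, by decide⟩
      have h1 : ((t0.length + 1 : Nat) : Int) - 1 = ((t0.length : Nat) : Int) := by push_cast; ring
      rw [h1, PySem.List.pyGet?_natCast, ← hcs, hsplit0]
      simp
  · -- no '[': A's find gives -1 and line[-1] reads the last character
    have hfind : PySem.Chars.find cs ['['] = -1 := by
      rw [find_single, if_neg hb]
    have hpre' : ']' ∈ cs := by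
      have := hpre
      unfold Pre_make_variables_py0_py at this
      rw [hfs, hfind] at this
      simpa using this
    have hne : cs ≠ [] := List.ne_nil_of_mem hpre'
    have hlast : cs.getLast hne ≠ ']' := by
      intro hh
      apply hd
      constructor
      · rw [isIn_bracket]
        simp
        exact hb
      · show PySem.Chars.endswith cs "]".toList = true
        rw [PySem.Chars.endswith]
        have h2 : cs.dropLast ++ [cs.getLast hne] = cs := List.dropLast_append_getLast hne
        rw [hh] at h2
        have h3 : [']'] <:+ cs := ⟨cs.dropLast, h2⟩
        simpa [List.isSuffixOf_iff_suffix] using h3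
    apply mainEq line typ 0 (by simpa using hpre') (by omega)
    · rw [hfs, hfind]; simp
    · refine ⟨cs.getLast hne, ?_, hlast⟩
      have h1 : ((0 : Nat) : Int) - 1 = -1 := by simp
      rw [h1, PySem.List.pyGet?_neg_one, List.getLast?_eq_some_getLast hne]

theorem make_variables_py0_py_tight : Claim_exact_make_variables_py0_py := by
  intro line typ _ _ hd heq
  set cs := line.toList with hcs
  obtain ⟨hno, hend⟩ := hd
  have hb : '[' ∉ cs := by
    rw [isIn_bracket] at hno
    simpa using hno
  have hfind : PySem.Str.find line "[" = -1 := by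
    show PySem.Chars.find cs ['['] = -1
    rw [find_single, if_neg hb]
  -- A returns k = 0: line[-1] is the final ']'
  have hsuf : [']'] <:+ cs := by
    have : PySem.Chars.endswith cs "]".toList = true := hend
    rw [PySem.Chars.endswith, List.isSuffixOf_iff_suffix] at this
    exact this
  obtain ⟨pre0, hpre0⟩ := hsuf
  have hlastget : PySem.List.pyGet? cs (-1) = some ']' := by
    rw [← hpre0]
    exact PySem.List.pyGet?_neg_one_append_singleton pre0 ']'
  have hA2 : (make_variables_py0_py line typ).2 = 0 := by
    simp only [make_variables_py0_py, hfind]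
    have hlen : cs.length = cs.length - 1 + 2 - 1 := by
      rw [← hpre0]; simp
    rw [show cs.length + 2 = (cs.length + 1) + 1 from rfl]
    rw [show mvAOuter cs typ (-1) 0 ("" ++ ("_o." ++ typ ++ " = [0] * " ++ PySem.Int.toStr ((PySem.Str.count line "," : Int) + 1) ++ "\n")) ((cs.length + 1) + 1)
        = match PySem.List.pyGet? cs (-1) with
          | none => none
          | some c =>
            if c = ']' then some ("" ++ ("_o." ++ typ ++ " = [0] * " ++ PySem.Int.toStr ((PySem.Str.count line "," : Int) + 1) ++ "\n"), 0)
            else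
              match mvAInner cs (-1) [] (cs.length + 1) with
              | none => none
              | some (p, i') =>
                let rline1 := ("" ++ ("_o." ++ typ ++ " = [0] * " ++ PySem.Int.toStr ((PySem.Str.count line "," : Int) + 1) ++ "\n")) ++ (String.ofList p ++ " = Symbol('" ++ String.ofList p ++ "')\n")
                let rline2 := rline1 ++ ("_o." ++ typ ++ "[" ++ PySem.Int.toStr 0 ++ "] = " ++ String.ofList p ++ "\n")
                mvAOuter cs typ (i' + 1) (0 + 1) rline2 (cs.length + 1) from rfl, hlastget]
    rfl
  have hmem : ']' ∈ cs := by
    rw [← hpre0]; simp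
  have hendi : PySem.Str.findFrom line "]" ((-1 : Int) + 1) = ((cs.takeWhile (· ≠ ']')).length : Int) := by
    have h0 : ((-1 : Int) + 1) = ((0 : Nat) : Int) := by norm_num
    rw [h0]
    show PySem.Chars.findFrom cs [']'] ((0 : Nat) : Int) none = _
    have hmem0 : ']' ∈ cs.drop 0 := by simpa using hmem
    rw [PySem.Chars.findFrom_natCast cs [']'] 0 (by omega), find_single, if_pos hmem0,
      if_neg (by omega)]
    simp
  have hB2 : 1 ≤ (make_variables_py0_py_alt line typ).2 := by
    simp only [make_variables_py0_py_alt, hfind, hendi]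
    rw [if_neg (by omega)]
    show 1 ≤ ((PySem.Chars.splitOn (PySem.List.slice cs (some ((-1 : Int) + 1)) (some ((cs.takeWhile (· ≠ ']')).length : Int))) [',']).length : Int)
    rw [splitOn_eq_pvTokens]
    have hlen := List.length_pos_of_ne_nil (pvTokens_ne_nil (PySem.List.slice cs (some ((-1 : Int) + 1)) (some ((cs.takeWhile (· ≠ ']')).length : Int))))
    omega
  rw [heq] at hA2
  rw [hA2] at hB2
  omega

theorem make_variables_py0_py_changed : Claim_changed_make_variables_py0_py := by
  unfold Claim_changed_make_variables_py0_py; decide
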